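-- pv_equiv track=rewrite | github.com/BakedPotato25/kiemtra01 | services/chatbot_service/chatbot/services.py | _sanitize_llm_answer
-- ===== SOURCE A (Python) =====
-- def _sanitize_llm_answer(answer_text):
--     text = str(answer_text or "").replace("\r\n", "\n").replace("\r", "\n").strip()
--     if not text:
--         return ""
--
--     leaked_markers = [
--         "shopping assistant for a multi-category electronics store",
--         "user question:",
--         "user profile:",
--         "dominant category hint:",
--         "retrieved kb context:",
--         "recommendation candidates:",
--         "faq snippets:",
--         "output style:",
--     ]
--     lines = []
--     for raw_line in text.split("\n"):
--         line = raw_line.strip().strip("`")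
--         if not line:
--             if lines and lines[-1] != "":
--                 lines.append("")
--             continue
--         lowered = line.lower()
--         if any(marker in lowered for marker in leaked_markers):
--             continue
--         lines.append(line)
--     while lines and lines[-1] == "":
--         lines.pop()
--     return "\n".join(lines).strip()
-- ===== SOURCE B (Python) =====
-- def _sanitize_llm_answer(answer_text):
--     text = str(answer_text or "").replace("\r\n", "\n").replace("\r", "\n").strip()
--     if not text:
--         return ""
--
--     leaked_markers = [
--         "shopping assistant for a multi-category electronics store",
--         "user question:",
--         "user profile:",
--         "dominant category hint:",
--         "retrieved kb context:",
--         "recommendation candidates:",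
--         "faq snippets:",
--         "output style:",
--     ]
--     cleaned = [raw.strip().strip("`") for raw in text.split("\n")]
--     kept = [line for line in cleaned
--             if line == "" or not any(marker in line.lower() for marker in leaked_markers)]
--     paragraphs = []
--     current = []
--     for line in kept:
--         if line:
--             current.append(line)
--         elif current:
--             paragraphs.append("\n".join(current))
--             current = []
--     if current:
--         paragraphs.append("\n".join(current))
--     return "\n\n".join(paragraphs).strip()
-- ===== Notes on version B (the rewrite author's own statement) =====
-- stated objective: alternative
-- what changed: A's single stateful loop with blank-lookback plus a trailing pop-while is replaced by a clean/filter comprehension pipeline followed by a paragraph accumulator whose paragraphs are joined with a blank-line separator, with no blank-line bookkeeping or trailing pop.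
import Mathlib
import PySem

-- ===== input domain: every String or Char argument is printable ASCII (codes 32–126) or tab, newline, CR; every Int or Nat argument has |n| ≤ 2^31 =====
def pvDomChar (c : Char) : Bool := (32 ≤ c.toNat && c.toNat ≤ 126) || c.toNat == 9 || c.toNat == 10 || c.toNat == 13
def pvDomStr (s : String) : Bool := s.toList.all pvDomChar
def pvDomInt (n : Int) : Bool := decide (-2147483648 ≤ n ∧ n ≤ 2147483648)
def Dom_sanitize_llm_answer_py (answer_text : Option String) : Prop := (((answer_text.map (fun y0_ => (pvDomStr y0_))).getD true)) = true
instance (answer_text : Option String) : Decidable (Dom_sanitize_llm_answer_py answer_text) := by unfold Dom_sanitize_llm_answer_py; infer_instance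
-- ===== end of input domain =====

-- B rewrites A's single stateful loop (blank-lookback collapse + trailing pop-while) as a
-- clean/filter pipeline followed by a paragraph accumulator joined with "\n\n": alternative
-- decomposition, same cost.

-- ===== PORT A =====
def pvLeakedMarkers : List String :=
  [ "shopping assistant for a multi-category electronics store",
    "user question:",
    "user profile:",
    "dominant category hint:",
    "retrieved kb context:",
    "recommendation candidates:",
    "faq snippets:",
    "output style:" ]

-- raw_line.strip().strip("`")
def pvClean (raw_line : String) : String :=
  PySem.Str.stripChars (PySem.Str.strip raw_line) "`"

-- the body of A's `for raw_line in text.split("\n")` loop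
def pvStepA (lines : List String) (raw_line : String) : List String :=
  let line := pvClean raw_line
  if line = "" then
    if lines ≠ [] ∧ lines.getLast? ≠ some "" then lines ++ [""] else lines
  else
    let lowered := PySem.Str.lower line
    if pvLeakedMarkers.any (fun marker => PySem.Str.isIn marker lowered) then lines
    else lines ++ [line]

-- `while lines and lines[-1] == "": lines.pop()`
def pvPopTrailing (lines : List String) : List String :=
  if h : lines ≠ [] ∧ lines.getLast? = some "" then pvPopTrailing lines.dropLast else lines
termination_by lines.length
decreasing_by
  have hne : lines ≠ [] := h.1
  have : lines.length ≠ 0 := fun h0 => hne (List.length_eq_zero_iff.mp h0)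
  simp [List.length_dropLast]; omega

def sanitize_llm_answer_py (answer_text : Option String) : String :=
  let text := PySem.Str.strip
    (PySem.Str.replace (PySem.Str.replace (answer_text.getD "") "\r\n" "\n") "\r" "\n")
  if text = "" then ""
  else
    let lines := ((PySem.Str.split? text "\n").getD []).foldl pvStepA []
    PySem.Str.strip (PySem.Str.join "\n" (pvPopTrailing lines))

-- ===== PORT B =====
-- B's filter condition: keep blanks and non-marker lines
def pvKeep (line : String) : Bool :=
  line == "" || !(pvLeakedMarkers.any (fun marker => PySem.Str.isIn marker (PySem.Str.lower line)))

-- the body of B's paragraph-accumulating loop: state = (paragraphs, current)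
def pvStepB (st : List String × List String) (line : String) : List String × List String :=
  if line ≠ "" then (st.1, st.2 ++ [line])
  else if st.2 ≠ [] then (st.1 ++ [PySem.Str.join "\n" st.2], [])
  else st

-- the `if current: paragraphs.append(...)` epilogue
def pvParagraphs (st : List String × List String) : List String :=
  if st.2 ≠ [] then st.1 ++ [PySem.Str.join "\n" st.2] else st.1

def sanitize_llm_answer_py_alt (answer_text : Option String) : String :=
  let text := PySem.Str.strip
    (PySem.Str.replace (PySem.Str.replace (answer_text.getD "") "\r\n" "\n") "\r" "\n")
  if text = "" then ""
  else
    let cleaned := ((PySem.Str.split? text "\n").getD []).map pvClean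
    let kept := cleaned.filter pvKeep
    let st := kept.foldl pvStepB ([], [])
    PySem.Str.strip (PySem.Str.join "\n\n" (pvParagraphs st))

-- ===== PRECONDITION & SPEC =====
def Spec_sanitize_llm_answer_py (answer_text : Option String) (out : String) : Prop := out = sanitize_llm_answer_py_alt answer_text
instance (answer_text : Option String) (out : String) : Decidable (Spec_sanitize_llm_answer_py answer_text out) := by unfold Spec_sanitize_llm_answer_py; infer_instance

-- ===== CLAIM (what is proved, stated in full; the proofs are below) =====
def Claim_equal_sanitize_llm_answer_py : Prop := ∀ (answer_text : Option String), Dom_sanitize_llm_answer_py answer_text → Spec_sanitize_llm_answer_py answer_text (sanitize_llm_answer_py answer_text)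

-- ===== LEMMAS AND PROOFS =====

-- A's collapse step, isolated from the marker filter
def pvCStep (acc : List String) (line : String) : List String :=
  if line = "" then
    if acc ≠ [] ∧ acc.getLast? ≠ some "" then acc ++ [""] else acc
  else acc ++ [line]

-- the flat line list a paragraph list denotes (one "" between paragraphs)
def pvGlue : List (List String) → List String
  | [] => []
  | [p] => p
  | p :: q :: r => p ++ [""] ++ pvGlue (q :: r)

-- invariant tying A's accumulator to B's (paragraphs, current) state
def pvInv (acc : List String) (st : List String × List String) : Prop :=
  ∃ psL : List (List String),
    st.1 = psL.map (fun p => PySem.Str.join "\n" p) ∧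
    (∀ p ∈ psL, p ≠ [] ∧ ∀ l ∈ p, l ≠ "") ∧
    (∀ l ∈ st.2, l ≠ "") ∧
    acc = (if st.2 = [] then pvGlue psL ++ (if psL = [] then [] else [""])
           else pvGlue (psL ++ [st.2]))

theorem pvStepA_eq (acc : List String) (raw : String) :
    pvStepA acc raw = if pvKeep (pvClean raw) then pvCStep acc (pvClean raw) else acc := by
  unfold pvStepA pvCStep pvKeep
  by_cases h : pvClean raw = ""
  · simp [h]
  · cases hm : pvLeakedMarkers.any (fun marker => PySem.Str.isIn marker (PySem.Str.lower (pvClean raw))) <;>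
      simp only [hm] <;> simp [h]

theorem pvGlue_cons_cons (p q : List String) (r : List (List String)) :
    pvGlue (p :: q :: r) = p ++ [""] ++ pvGlue (q :: r) := rfl

theorem pvGlue_append_singleton (xs : List (List String)) (a : List String) :
    pvGlue (xs ++ [a]) = if xs = [] then a else pvGlue xs ++ [""] ++ a := by
  induction xs with
  | nil => simp [pvGlue]
  | cons p t ih =>
    cases t with
    | nil => simp [pvGlue]
    | cons q u =>
      rw [List.cons_append, List.cons_append, pvGlue_cons_cons, ← List.cons_append, ih,
        if_neg (by simp), if_neg (by simp), pvGlue_cons_cons]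
      simp [List.append_assoc]

theorem pvGlue_ne_nil (p : List String) (r : List (List String)) (hp : p ≠ []) :
    pvGlue (p :: r) ≠ [] := by
  cases r with
  | nil => simpa [pvGlue] using hp
  | cons q u =>
    rw [pvGlue_cons_cons]
    intro hcontra
    have hlen := congrArg List.length hcontra
    simp at hlen

theorem pvGlue_getLast?_append (xs : List (List String)) (a : List String) (ha : a ≠ []) :
    (pvGlue (xs ++ [a])).getLast? = a.getLast? := by
  rw [pvGlue_append_singleton]
  split
  · rfl
  · rw [List.append_assoc, List.getLast?_append_of_ne_nil _ (by simp [ha]),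
      List.getLast?_append_of_ne_nil _ ha]

theorem pvGlue_getLast?_ne (psL : List (List String))
    (h : ∀ p ∈ psL, p ≠ [] ∧ ∀ l ∈ p, l ≠ "") (hne : psL ≠ []) :
    (pvGlue psL).getLast? ≠ some "" := by
  have hdecomp : psL.dropLast ++ [psL.getLast hne] = psL := List.dropLast_append_getLast hne
  have ha := h (psL.getLast hne) (List.getLast_mem hne)
  rw [← hdecomp, pvGlue_getLast?_append _ _ ha.1,
    List.getLast?_eq_some_getLast (l := psL.getLast hne) ha.1]
  intro hc
  exact ha.2 _ (List.getLast_mem ha.1) (Option.some.inj hc)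

theorem pvPopTrailing_nil : pvPopTrailing [] = [] := by
  rw [pvPopTrailing]
  simp

theorem pvPopTrailing_of_last_ne (l : List String) (h : l.getLast? ≠ some "") :
    pvPopTrailing l = l := by
  rw [pvPopTrailing, dif_neg (fun hc => h hc.2)]

theorem pvPopTrailing_append_blank (l : List String) :
    pvPopTrailing (l ++ [""]) = pvPopTrailing l := by
  rw [pvPopTrailing, dif_pos ⟨by simp, by simp⟩]
  simp

-- one step preserves the invariant
theorem pvInv_step (acc : List String) (st : List String × List String) (l : String)
    (h : pvInv acc st) : pvInv (pvCStep acc l) (pvStepB st l) := by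
  obtain ⟨psL, h1, h2, h3, h4⟩ := h
  by_cases hl : l = ""
  · subst hl
    by_cases hc : st.2 = []
    · -- blank line, empty current: both sides are no-ops
      have hstep : pvStepB st "" = st := by simp [pvStepB, hc]
      rw [hstep]
      refine ⟨psL, h1, h2, h3, ?_⟩
      have hfix : pvCStep acc "" = acc := by
        by_cases hps : psL = []
        · have hacc : acc = [] := by rw [h4]; simp [hc, hps, pvGlue]
          simp [pvCStep, hacc]
        · have hlastA : acc.getLast? = some "" := by
            rw [h4]; simp [hc, hps]
          simp [pvCStep, hlastA]
      rw [hfix]; exact h4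
    · -- blank line, nonempty current: A appends "", B closes the paragraph
      have hstep : pvStepB st "" = (st.1 ++ [PySem.Str.join "\n" st.2], []) := by
        simp [pvStepB, hc]
      rw [hstep]
      have hlast : acc.getLast? = st.2.getLast? := by
        rw [h4, if_neg hc]; exact pvGlue_getLast?_append psL st.2 hc
      have hlast2 : acc.getLast? ≠ some "" := by
        rw [hlast, List.getLast?_eq_some_getLast (l := st.2) hc]
        intro hx
        exact h3 _ (List.getLast_mem hc) (Option.some.inj hx)
      have hacc : acc ≠ [] := by
        rw [h4, if_neg hc]
        cases psL with
        | nil => simpa [pvGlue] using hc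
        | cons p t => exact pvGlue_ne_nil p (t ++ [st.2]) (h2 p (by simp)).1
      refine ⟨psL ++ [st.2], ?_, ?_, ?_, ?_⟩
      · simp [h1]
      · intro p hp
        rcases List.mem_append.mp hp with hp | hp
        · exact h2 p hp
        · rw [List.mem_singleton] at hp; subst hp; exact ⟨hc, h3⟩
      · intro x hx; simp at hx
      · have hCS : pvCStep acc "" = acc ++ [""] := by
          simp [pvCStep, hacc, hlast2]
        rw [hCS, h4, if_neg hc]
        simp
  · -- nonblank line: A appends it, B extends current
    have hstep : pvStepB st l = (st.1, st.2 ++ [l]) := by simp [pvStepB, hl]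
    rw [hstep]
    refine ⟨psL, h1, h2, ?_, ?_⟩
    · intro x hx
      rcases List.mem_append.mp hx with hx | hx
      · exact h3 x hx
      · rw [List.mem_singleton] at hx; subst hx; exact hl
    · have hCS : pvCStep acc l = acc ++ [l] := by simp [pvCStep, hl]
      rw [hCS]
      show acc ++ [l] = if st.2 ++ [l] = [] then _ else pvGlue (psL ++ [st.2 ++ [l]])
      rw [if_neg (show ¬(st.2 ++ [l] = []) by simp)]
      by_cases hc : st.2 = []
      · rw [if_pos hc] at h4
        rw [h4, hc]
        simp only [List.nil_append]
        rw [pvGlue_append_singleton]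
        by_cases hps : psL = []
        · subst hps; simp [pvGlue]
        · simp [hps, List.append_assoc]
      · rw [if_neg hc] at h4
        rw [h4, pvGlue_append_singleton, pvGlue_append_singleton]
        by_cases hps : psL = []
        · subst hps; simp [pvGlue]
        · simp [hps, List.append_assoc]

theorem pvInv_foldl (ks : List String) (acc : List String) (st : List String × List String)
    (h : pvInv acc st) : pvInv (ks.foldl pvCStep acc) (ks.foldl pvStepB st) := by
  induction ks generalizing acc st with
  | nil => exact h
  | cons k t ih => exact ih _ _ (pvInv_step acc st k h)

-- ---- join lemmas, at the Chars level ----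

theorem pvToList_inj (s t : String) (h : s.toList = t.toList) : s = t := by
  have := congrArg String.ofList h
  simpa using this

theorem pvJoin_append (s : List Char) (xs ys : List (List Char)) (hx : xs ≠ []) (hy : ys ≠ []) :
    PySem.Chars.join s (xs ++ ys) = PySem.Chars.join s xs ++ s ++ PySem.Chars.join s ys := by
  induction xs with
  | nil => exact absurd rfl hx
  | cons a t ih =>
    cases t with
    | nil =>
      cases ys with
      | nil => exact absurd rfl hy
      | cons y ys' => simp [PySem.Chars.join_cons_cons, PySem.Chars.join_singleton]
    | cons b u =>
      have hih := ih (by simp)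
      rw [List.cons_append, List.cons_append, PySem.Chars.join_cons_cons, ← List.cons_append, hih,
        PySem.Chars.join_cons_cons]
      simp [List.append_assoc]

def pvCharGlue : List (List (List Char)) → List (List Char)
  | [] => []
  | [p] => p
  | p :: q :: r => p ++ [[]] ++ pvCharGlue (q :: r)

theorem pvCharGlue_cons_cons (p q : List (List Char)) (r : List (List (List Char))) :
    pvCharGlue (p :: q :: r) = p ++ [[]] ++ pvCharGlue (q :: r) := rfl

theorem pvCharGlue_ne_nil (p : List (List Char)) (r : List (List (List Char))) (hp : p ≠ []) :
    pvCharGlue (p :: r) ≠ [] := by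
  cases r with
  | nil => simpa [pvCharGlue] using hp
  | cons q u =>
    rw [pvCharGlue_cons_cons]
    intro hcontra
    have hlen := congrArg List.length hcontra
    simp at hlen

theorem pvMap_toList_glue (ps : List (List String)) :
    (pvGlue ps).map String.toList = pvCharGlue (ps.map (fun p => p.map String.toList)) := by
  induction ps with
  | nil => rfl
  | cons p t ih =>
    cases t with
    | nil => rfl
    | cons q u =>
      rw [pvGlue_cons_cons, List.map_cons, List.map_cons, pvCharGlue_cons_cons,
        List.map_append, List.map_append, ← List.map_cons, ← ih]
      rfl

theorem pvJoinNN_chars (qs : List (List (List Char))) (h : ∀ q ∈ qs, q ≠ []) :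
    PySem.Chars.join ['\n'] (pvCharGlue qs)
      = PySem.Chars.join ['\n', '\n'] (qs.map (PySem.Chars.join ['\n'])) := by
  induction qs with
  | nil => rfl
  | cons q t ih =>
    cases t with
    | nil => simp [pvCharGlue, PySem.Chars.join_singleton]
    | cons r u =>
      have hq : q ≠ [] := h q (by simp)
      have hr : r ≠ [] := h r (by simp)
      have hglue : pvCharGlue (r :: u) ≠ [] := pvCharGlue_ne_nil r u hr
      have step1 : pvCharGlue (q :: r :: u) = q ++ ([] :: pvCharGlue (r :: u)) := by
        rw [pvCharGlue_cons_cons]; simp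
      rw [step1, pvJoin_append ['\n'] q ([] :: pvCharGlue (r :: u)) hq (by simp)]
      obtain ⟨g, gs, hg⟩ := List.exists_cons_of_ne_nil hglue
      rw [hg, PySem.Chars.join_cons_cons, ← hg,
        ih (fun x hx => h x (by simp [hx]))]
      simp [List.map_cons, PySem.Chars.join_cons_cons, List.append_assoc]

theorem pvJoinNN (ps : List (List String)) (h : ∀ p ∈ ps, p ≠ []) :
    PySem.Str.join "\n" (pvGlue ps) = PySem.Str.join "\n\n" (ps.map (fun p => PySem.Str.join "\n" p)) := by
  apply pvToList_inj
  rw [PySem.Str.toList_join, PySem.Str.toList_join]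
  have hsep : ("\n" : String).toList = ['\n'] := by decide
  have hsep2 : ("\n\n" : String).toList = ['\n', '\n'] := by decide
  rw [hsep, hsep2, pvMap_toList_glue]
  have hmap : (ps.map (fun p => PySem.Str.join "\n" p)).map String.toList
      = (ps.map (fun p => p.map String.toList)).map (PySem.Chars.join ['\n']) := by
    simp only [List.map_map]
    apply List.map_congr_left
    intro p _
    simp [PySem.Str.toList_join, hsep]
  rw [hmap]
  apply pvJoinNN_chars
  intro q hq
  simp only [List.mem_map] at hq
  obtain ⟨p, hp, rfl⟩ := hq
  simpa using h p hp

theorem pvStrJoin_nil (sep : String) : PySem.Str.join sep [] = "" := by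
  apply pvToList_inj
  rw [PySem.Str.toList_join]
  simp [PySem.Chars.join_nil]

-- from the invariant at the end of the loop to the two output strings
theorem pvFinal (acc : List String) (st : List String × List String) (h : pvInv acc st) :
    PySem.Str.join "\n" (pvPopTrailing acc) = PySem.Str.join "\n\n" (pvParagraphs st) := by
  obtain ⟨psL, h1, h2, h3, h4⟩ := h
  by_cases hc : st.2 = []
  · by_cases hps : psL = []
    · subst hps
      have hacc : acc = [] := by rw [h4]; simp [hc, pvGlue]
      rw [hacc, pvPopTrailing_nil]
      simp [pvParagraphs, hc, h1, pvStrJoin_nil]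
    · rw [h4, if_pos hc, if_neg hps, pvPopTrailing_append_blank,
        pvPopTrailing_of_last_ne _ (pvGlue_getLast?_ne psL h2 hps),
        pvJoinNN psL (fun p hp => (h2 p hp).1)]
      simp [pvParagraphs, hc, h1]
  · rw [h4, if_neg hc]
    have hlast : (pvGlue (psL ++ [st.2])).getLast? ≠ some "" := by
      apply pvGlue_getLast?_ne
      · intro p hp
        rcases List.mem_append.mp hp with hp | hp
        · exact h2 p hp
        · rw [List.mem_singleton] at hp; subst hp; exact ⟨hc, h3⟩
      · simp
    rw [pvPopTrailing_of_last_ne _ hlast,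
      pvJoinNN (psL ++ [st.2]) (fun p hp => by
        rcases List.mem_append.mp hp with hp | hp
        · exact (h2 p hp).1
        · rw [List.mem_singleton] at hp; subst hp; exact hc)]
    simp [pvParagraphs, hc, h1]

-- the whole pipeline, for an arbitrary line list
theorem pvPipeline (raws : List String) :
    PySem.Str.join "\n" (pvPopTrailing (raws.foldl pvStepA []))
      = PySem.Str.join "\n\n" (pvParagraphs (((raws.map pvClean).filter pvKeep).foldl pvStepB ([], []))) := by
  have hA : raws.foldl pvStepA [] = ((raws.map pvClean).filter pvKeep).foldl pvCStep [] := by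
    rw [List.foldl_filter, List.foldl_map]
    have hfun : pvStepA = fun (acc : List String) (x : String) =>
        if pvKeep (pvClean x) then pvCStep acc (pvClean x) else acc := by
      funext acc x; exact pvStepA_eq acc x
    rw [hfun]
  rw [hA]
  exact pvFinal _ _ (pvInv_foldl _ _ _ ⟨[], rfl, by simp, by simp, by simp [pvGlue]⟩)

-- ===== VERDICT (by name: the statement is the Claim_ definition above) =====
theorem sanitize_llm_answer_py_spec : Claim_equal_sanitize_llm_answer_py := by
  intro answer_text _
  unfold Spec_sanitize_llm_answer_py sanitize_llm_answer_py sanitize_llm_answer_py_alt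
  by_cases h : PySem.Str.strip
      (PySem.Str.replace (PySem.Str.replace (answer_text.getD "") "\r\n" "\n") "\r" "\n") = ""
  · simp [h]
  · simp only [h, if_neg]
    exact congrArg PySem.Str.strip (pvPipeline _)
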